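-- pv_equiv track=rewrite | github.com/danielmanu93/Graph-Neural-Networks | models/controller/multiRNN_controller.py | _deconstruct_action
-- ===== SOURCE A (Python) =====
-- def _deconstruct_action(actions, state_space, num_tokens):
--     state_length = len(state_space)
--     keys = list(state_space.keys())
--     layers = []
--     for action in actions:
--         predicted_actions = []
--         for index, each in enumerate(action):
--             state_index = index % state_length
--             if index == len(action)-1:
--                 # delete the last action in architecture, which is the output dimension
--                 continue
--             state_position = state_space[keys[state_index]].index(each)
--             embedding_position = int(sum(num_tokens[:index]) + state_position)
--             predicted_actions.append(embedding_position)
--         layers.append(predicted_actions)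
--     return layers
-- ===== SOURCE B (Python) =====
-- def _deconstruct_action(actions, state_space, num_tokens):
--     state_length = len(state_space)
--     value_lists = list(state_space.values())
--     # prefix sums of num_tokens: prefix[k] == sum(num_tokens[:k])
--     prefix = [0]
--     total = 0
--     for t in num_tokens:
--         total += t
--         prefix.append(total)
--     # first-occurrence position maps, one per state
--     pos_maps = []
--     for vals in value_lists:
--         m = {}
--         for p, v in enumerate(vals):
--             if v not in m:
--                 m[v] = p
--         pos_maps.append(m)
--     n = len(num_tokens)
--     return [[prefix[min(i, n)] + pos_maps[i % state_length][action[i]]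
--              for i in range(len(action) - 1)]
--             for action in actions]
-- ===== Notes on version B (the rewrite author's own statement) =====
-- stated objective: faster
-- what changed: Replaces the per-element sum(num_tokens[:index]) re-summation and list.index linear scan by a precomputed prefix-sum table and one first-occurrence value-to-position dict per state, so each action element costs O(1).
import Mathlib
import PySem

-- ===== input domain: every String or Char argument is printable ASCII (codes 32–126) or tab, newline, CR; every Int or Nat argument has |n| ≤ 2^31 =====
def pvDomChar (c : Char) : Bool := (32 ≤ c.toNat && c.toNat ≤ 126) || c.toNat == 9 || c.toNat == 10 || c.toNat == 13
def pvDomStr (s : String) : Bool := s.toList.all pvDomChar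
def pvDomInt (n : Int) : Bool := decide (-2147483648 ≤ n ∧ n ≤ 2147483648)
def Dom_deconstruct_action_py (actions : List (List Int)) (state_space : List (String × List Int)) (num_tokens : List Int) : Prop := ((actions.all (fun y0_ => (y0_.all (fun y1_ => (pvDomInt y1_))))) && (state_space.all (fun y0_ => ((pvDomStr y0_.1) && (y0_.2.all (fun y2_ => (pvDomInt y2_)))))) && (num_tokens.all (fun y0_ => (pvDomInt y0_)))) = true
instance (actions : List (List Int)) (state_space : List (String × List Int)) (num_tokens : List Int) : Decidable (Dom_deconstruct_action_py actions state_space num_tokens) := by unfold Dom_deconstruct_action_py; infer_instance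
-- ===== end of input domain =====

-- B replaces A's per-element sum(num_tokens[:index]) and list.index scan by a precomputed
-- prefix-sum table and one first-occurrence value→position dict per state (objective: faster).

-- ===== PORT A =====
-- literal transliteration of A (the state_space dict is the assoc list via PySem.Dict.ofList)
def deconstruct_action_py (actions : List (List Int)) (state_space : List (String × List Int)) (num_tokens : List Int) : List (List Int) :=
  let ss := PySem.Dict.ofList state_space
  let state_length : Int := ss.size
  let keys : List String := ss.keys
  actions.foldl (fun layers action =>
    let predicted_actions := (PySem.List.enumerate action).foldl (fun acc p =>
      let index : Int := p.1
      let each : Int := p.2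
      let state_index := PySem.Int.mod index state_length
      if index = (action.length : Int) - 1 then acc
      else
        let vals := (ss.get? ((PySem.List.pyGet? keys state_index).getD "")).getD []
        let state_position : Int := ((PySem.List.index? vals each).getD 0 : Nat)
        let embedding_position := (PySem.List.slice num_tokens none (some index)).sum + state_position
        acc ++ [embedding_position]) ([] : List Int)
    layers ++ [predicted_actions]) []

-- ===== PORT B =====
-- literal transliteration of Source B: prefix sums + first-occurrence position dicts
def deconstruct_action_py_alt (actions : List (List Int)) (state_space : List (String × List Int)) (num_tokens : List Int) : List (List Int) :=
  let ss := PySem.Dict.ofList state_space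
  let state_length : Int := ss.size
  let value_lists := ss.values
  let pfx := (num_tokens.foldl (fun (st : List Int × Int) t => (st.1 ++ [st.2 + t], st.2 + t)) ([0], 0)).1
  let pos_maps : List (PySem.Dict Int Int) := value_lists.map (fun vals =>
    (PySem.List.enumerate vals).foldl (fun m p => if m.contains p.2 then m else m.insert p.2 p.1) PySem.Dict.empty)
  let n : Int := num_tokens.length
  actions.map (fun action =>
    (PySem.List.pyRange 0 ((action.length : Int) - 1) 1).map (fun i =>
      PySem.List.pyGetD pfx (min i n) 0 +
      ((PySem.List.pyGet? pos_maps (PySem.Int.mod i state_length)).getD PySem.Dict.empty).getD (PySem.List.pyGetD action i 0) 0))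

-- ===== PRECONDITION & SPEC =====
-- Pre_ excludes exactly the inputs where the Python A raises: a non-empty action with an
-- empty state_space (ZeroDivisionError in index % state_length), or a non-last action element
-- absent from its state's value list (ValueError in list.index).
def Pre_deconstruct_action_py (actions : List (List Int)) (state_space : List (String × List Int)) (num_tokens : List Int) : Prop :=
  ((∀ a ∈ actions, a = []) ∨ (PySem.Dict.ofList state_space).size ≠ 0) ∧
  ∀ a ∈ actions, ∀ i < a.length - 1,
    a.getD i 0 ∈ ((PySem.Dict.ofList state_space).values).getD (i % (PySem.Dict.ofList state_space).size) []
instance (actions : List (List Int)) (state_space : List (String × List Int)) (num_tokens : List Int) : Decidable (Pre_deconstruct_action_py actions state_space num_tokens) := by unfold Pre_deconstruct_action_py; infer_instance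

def pvWitness_deconstruct_action_py : List (List Int) × (List (String × List Int)) × List Int :=
  ([[0, 5], [1]], [("a", [0, 1]), ("b", [5, 7])], [2, 3])

def Spec_deconstruct_action_py (actions : List (List Int)) (state_space : List (String × List Int)) (num_tokens : List Int) (out : List (List Int)) : Prop := out = deconstruct_action_py_alt actions state_space num_tokens
instance (actions : List (List Int)) (state_space : List (String × List Int)) (num_tokens : List Int) (out : List (List Int)) : Decidable (Spec_deconstruct_action_py actions state_space num_tokens out) := by unfold Spec_deconstruct_action_py; infer_instance

-- ===== CLAIM (what is proved, stated in full; the proofs are below) =====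
def Claim_equal_deconstruct_action_py : Prop := ∀ (actions : List (List Int)) (state_space : List (String × List Int)) (num_tokens : List Int), Dom_deconstruct_action_py actions state_space num_tokens → Pre_deconstruct_action_py actions state_space num_tokens → Spec_deconstruct_action_py actions state_space num_tokens (deconstruct_action_py actions state_space num_tokens)

-- ===== LEMMAS AND PROOFS =====

-- skip-style foldl is a map over the filtered list
theorem pv_foldl_skip {α β : Type} (l : List α) (c : α → Prop) [DecidablePred c] (f : α → β) (acc : List β) :
    l.foldl (fun acc x => if c x then acc else acc ++ [f x]) acc
      = acc ++ (l.filter (fun x => !decide (c x))).map f := by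
  induction l generalizing acc with
  | nil => simp
  | cons x xs ih =>
    by_cases hx : c x <;> simp [hx, ih]

-- the prefix-sum loop of B
theorem pv_pfx_loop (nt pr : List Int) (s : Int) :
    (nt.foldl (fun (st : List Int × Int) t => (st.1 ++ [st.2 + t], st.2 + t)) (pr, s)).1
      = pr ++ (List.range nt.length).map (fun m => s + (nt.take (m + 1)).sum) := by
  induction nt generalizing pr s with
  | nil => simp
  | cons t ts ih =>
    simp only [List.foldl_cons, ih, List.length_cons, List.range_succ_eq_map]
    simp [List.map_map, Function.comp, add_assoc]

theorem pv_pfx_eq (nt : List Int) :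
    (nt.foldl (fun (st : List Int × Int) t => (st.1 ++ [st.2 + t], st.2 + t)) (([0], 0) : List Int × Int)).1
      = (List.range (nt.length + 1)).map (fun m => (nt.take m).sum) := by
  rw [pv_pfx_loop, List.range_succ_eq_map]
  simp [List.map_map, Function.comp]

-- first-occurrence dict lookup = list.index
theorem pv_posmap_loop (vals : List Int) (v : Int) (s : Int) (m : PySem.Dict Int Int) :
    ((PySem.List.enumerate vals s).foldl (fun m p => if m.contains p.2 then m else m.insert p.2 p.1) m).get? v
      = if m.contains v then m.get? v else (PySem.List.index? vals v).map (fun (k : Nat) => s + (k : Int)) := by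
  induction vals generalizing s m with
  | nil =>
    rw [PySem.List.enumerate_nil]
    simp only [List.foldl_nil]
    split_ifs with h
    · rfl
    · rw [(PySem.Dict.get?_eq_none_iff_contains _ _).mpr (by simpa using h)]
      simp [PySem.List.index?_eq_idxOf?]
  | cons x xs ih =>
    rw [PySem.List.enumerate_cons, List.foldl_cons]
    dsimp only
    by_cases hvx : v = x
    · subst hvx
      by_cases hx : m.contains v
      · rw [if_pos hx, ih, if_pos hx, if_pos hx]
      · rw [if_neg hx, ih, if_pos (PySem.Dict.contains_insert_self _ _ _), if_neg hx,
          PySem.Dict.get?_insert_self _ _ _, PySem.List.index?_cons_self _ _]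
        simp
    · have hne : x ≠ v := fun h => hvx h.symm
      have hcast : ∀ (o : Option Nat),
          (o.map (fun k : Nat => (s + 1) + (k : Int))) = ((o.map (· + 1)).map (fun k : Nat => s + (k : Int))) := by
        intro o; cases o <;> simp <;> ring
      by_cases hx : m.contains x
      · rw [if_pos hx, ih, PySem.List.index?_cons_of_ne xs hne]
        split_ifs with hv
        · rfl
        · exact hcast _
      · rw [if_neg hx, ih, PySem.Dict.get?_insert_of_ne _ _ hvx, PySem.Dict.contains_insert _ _ _ _,
          show (v == x || m.contains v) = m.contains v by simp [hvx],
          PySem.List.index?_cons_of_ne xs hne]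
        split_ifs with hv
        · rfl
        · exact hcast _

theorem pv_posmap_getD (vals : List Int) (v : Int) (hv : v ∈ vals) :
    ((PySem.List.enumerate vals).foldl (fun m p => if m.contains p.2 then m else m.insert p.2 p.1) PySem.Dict.empty).getD v 0
      = (((PySem.List.index? vals v).getD 0 : Nat) : Int) := by
  rw [PySem.Dict.getD_eq_get?_getD, pv_posmap_loop]
  rw [if_neg (by simp [PySem.Dict.contains_empty])]
  obtain ⟨k, hk⟩ := Option.isSome_iff_exists.mp ((PySem.List.index?_isSome_iff _ _).mpr hv)
  rw [hk]
  simp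

-- filtering out the last index of an enumeration drops the last element
theorem pv_filter_enumerate (a : List Int) :
    (PySem.List.enumerate a).filter (fun p => !decide (p.1 = (a.length : Int) - 1))
      = PySem.List.enumerate a.dropLast := by
  rcases eq_or_ne a [] with rfl | hne
  · simp [PySem.List.enumerate_nil]
  · have hlen : a.dropLast.length = a.length - 1 := List.length_dropLast
    have hpos : 1 ≤ a.length := List.length_pos_of_ne_nil hne
    rw [show PySem.List.enumerate a = PySem.List.enumerate (a.dropLast ++ [a.getLast hne]) by
      rw [List.dropLast_concat_getLast hne]]
    rw [PySem.List.enumerate_append, List.filter_append]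
    have h1 : (PySem.List.enumerate a.dropLast).filter (fun p => !decide (p.1 = (a.length : Int) - 1))
        = PySem.List.enumerate a.dropLast := by
      apply List.filter_eq_self.mpr
      intro p hp
      rw [PySem.List.mem_enumerate_iff] at hp
      obtain ⟨k, hk, rfl⟩ := hp
      dsimp only
      simp only [Bool.not_eq_eq_eq_not, Bool.not_true, decide_eq_false_iff_not]
      omega
    have h2 : (PySem.List.enumerate [a.getLast hne] ((0 : Int) + a.dropLast.length)).filter
        (fun p => !decide (p.1 = (a.length : Int) - 1)) = [] := by
      rw [PySem.List.enumerate_cons, PySem.List.enumerate_nil]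
      simp only [List.filter_cons, List.filter_nil]
      have heq : ((0 : Int) + a.dropLast.length) = (a.length : Int) - 1 := by omega
      simp only [heq]
      simp
    rw [h1, h2, List.append_nil]

-- the per-element agreement, and the assembled theorem
theorem deconstruct_action_py_spec : Claim_equal_deconstruct_action_py := by
  intro actions state_space num_tokens _ hpre
  obtain ⟨hsz, hmem⟩ := hpre
  unfold Spec_deconstruct_action_py deconstruct_action_py deconstruct_action_py_alt
  simp only []
  rw [PySem.List.foldl_append_singleton_eq_map, List.nil_append]
  apply List.map_congr_left
  intro action hact
  rw [pv_foldl_skip (PySem.List.enumerate action) (fun p : Int × Int => p.1 = (action.length : Int) - 1), List.nil_append,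
    pv_filter_enumerate, PySem.List.enumerate_eq_map_pyRange action.dropLast 0, List.map_map]
  rcases eq_or_ne action [] with rfl | hane
  · simp [PySem.List.pyRange_one_eq_nil]
  · have hsz' : (PySem.Dict.ofList state_space).size ≠ 0 := by
      rcases hsz with h | h
      · exact absurd (h action hact) hane
      · exact h
    have hbound : PySem.List.len action.dropLast = (action.length : Int) - 1 := by
      have := List.length_pos_of_ne_nil hane
      simp [PySem.List.len_eq, List.length_dropLast]
      omega
    rw [hbound]
    apply List.map_congr_left
    intro j hj
    rw [PySem.List.mem_pyRange_one] at hj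
    obtain ⟨hj0, hj1⟩ := hj
    -- name the pieces
    set ss := PySem.Dict.ofList state_space with hss
    have hkj : j = ((j.toNat : Nat) : Int) := (Int.toNat_of_nonneg hj0).symm
    set k := j.toNat with hkdef
    have hklt : k + 1 < action.length := by omega
    -- the shared state index
    have hszpos : 0 < ss.size := Nat.pos_of_ne_zero hsz'
    have hmodeq : PySem.Int.mod j (ss.size : Int) = ((k % ss.size : Nat) : Int) := by
      rw [hkj]; exact PySem.Int.mod_natCast k ss.size
    set idx := k % ss.size with hidx
    have hidxlt : idx < ss.size := Nat.mod_lt _ hszpos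
    have hkeyslen : ss.keys.length = ss.size := by
      simp [PySem.Dict.keys, PySem.Dict.size]
    have hvalslen : ss.values.length = ss.size := by
      simp [PySem.Dict.values, PySem.Dict.size]
    -- the shared action element
    have helem : PySem.List.pyGetD action.dropLast j 0 = action[k]'(by omega) := by
      rw [PySem.List.pyGetD_eq_getElem _ _ hj0 (by simp [List.length_dropLast]; omega)]
      simp [List.getElem_dropLast]
      rfl
    -- A's key lookup returns the idx-th value list
    have hpair : (ss.keys[idx]'(by omega), ss.values[idx]'(by omega)) = ss.items[idx]'hidxlt := by
      simp [PySem.Dict.keys, PySem.Dict.values]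
      rfl
    have hget : ss.get? (ss.keys[idx]'(by omega)) = some (ss.values[idx]'(by omega)) := by
      apply PySem.Dict.get?_of_mem_items
      · rw [hpair]; exact List.getElem_mem _
      · exact PySem.Dict.nodup_keys_ofList _
    have hkeyget : PySem.List.pyGet? ss.keys (PySem.Int.mod j (ss.size : Int))
        = some (ss.keys[idx]'(by omega)) := by
      rw [hmodeq, PySem.List.pyGet?_natCast]
      exact List.getElem?_eq_getElem (by omega)
    -- membership of the element (from Pre_)
    have hmemv : action[k]'(by omega) ∈ ss.values[idx]'(by omega) := by
      have := hmem action hact k (by omega)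
      rwa [List.getD_eq_getElem _ _ (by omega), List.getD_eq_getElem _ _ (by omega)] at this
    -- B's pos-map lookup
    have hposmap : PySem.List.pyGet? (ss.values.map (fun vals =>
          (PySem.List.enumerate vals).foldl
            (fun m p => if m.contains p.2 then m else m.insert p.2 p.1) PySem.Dict.empty))
          (PySem.Int.mod j (ss.size : Int))
        = some ((PySem.List.enumerate (ss.values[idx]'(by omega))).foldl
            (fun m p => if m.contains p.2 then m else m.insert p.2 p.1) PySem.Dict.empty) := by
      rw [hmodeq, PySem.List.pyGet?_natCast]
      rw [List.getElem?_eq_getElem (by simp [hvalslen]; omega)]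
      simp
    -- the prefix-sum lookup
    have hsum : (PySem.List.slice num_tokens none (some j)).sum
        = PySem.List.pyGetD ((num_tokens.foldl
            (fun (st : List Int × Int) t => (st.1 ++ [st.2 + t], st.2 + t)) (([0], 0) : List Int × Int)).1)
            (min j (num_tokens.length : Int)) 0 := by
      rw [pv_pfx_eq, PySem.List.slice_to _ hj0]
      rw [PySem.List.pyGetD_of_nonneg _ 0 (le_min hj0 (by positivity))]
      have hmin : (min j (num_tokens.length : Int)).toNat = min k num_tokens.length := by omega
      rw [hmin, PySem.List.getD_map_range _ _ _ _ (by omega)]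
      by_cases h : k ≤ num_tokens.length
      · rw [min_eq_left h, ← hkdef]
      · rw [min_eq_right (by omega), ← hkdef,
          List.take_of_length_le (by omega), List.take_of_length_le (le_refl _)]
    simp only [Function.comp_apply]
    rw [helem, hkeyget]
    simp only [Option.getD_some]
    rw [hget]
    simp only [Option.getD_some]
    rw [hposmap]
    simp only [Option.getD_some]
    rw [hsum,
      show PySem.List.pyGetD action j 0 = action[k]'(by omega) from
        PySem.List.pyGetD_eq_getElem _ _ hj0 (by omega),
      pv_posmap_getD _ _ hmemv]
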